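-- pv_equiv track=rewrite | github.com/samjkwong/NLG-NMT | nmt/utils.py | pad_sents
-- ===== SOURCE A (Python) =====
-- def pad_sents(sents, pad_token):
--     """ Pad list of sentences according to the longest sentence in the batch.
--     @param sents (list[list[int]]): list of sentences, where each sentence
--                                     is represented as a list of words
--     @param pad_token (int): padding token
--     @returns sents_padded (list[list[int]]): list of sentences where sentences shorter
--         than the max length sentence are padded out with the pad_token, such that
--         each sentences in the batch now has equal length.
--         Output shape: (batch_size, max_sentence_length)
--     """
--     sents_padded = []
--
--     max_len = max(len(s) for s in sents)
--     batch_size = len(sents)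
--
--     for s in sents:
--         padded = [pad_token] * max_len
--         padded[:len(s)] = s
--         sents_padded.append(padded)
--
--     return sents_padded
-- ===== SOURCE B (Python) =====
-- def pad_sents(sents, pad_token):
--     """Column-wise padding: grow every row one position at a time."""
--     max_len = max(len(s) for s in sents)
--     out = [[] for _ in sents]
--     for j in range(max_len):
--         for row, s in zip(out, sents):
--             row.append(s[j] if j < len(s) else pad_token)
--     return out
-- ===== Notes on version B (the rewrite author's own statement) =====
-- stated objective: alternative
-- what changed: B pads column-wise: it iterates over positions 0..max_len-1 and appends to every row the sentence's token at that position or the pad token, instead of A's per-sentence pre-filled pad buffer overwritten by slice assignment.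
import Mathlib
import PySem

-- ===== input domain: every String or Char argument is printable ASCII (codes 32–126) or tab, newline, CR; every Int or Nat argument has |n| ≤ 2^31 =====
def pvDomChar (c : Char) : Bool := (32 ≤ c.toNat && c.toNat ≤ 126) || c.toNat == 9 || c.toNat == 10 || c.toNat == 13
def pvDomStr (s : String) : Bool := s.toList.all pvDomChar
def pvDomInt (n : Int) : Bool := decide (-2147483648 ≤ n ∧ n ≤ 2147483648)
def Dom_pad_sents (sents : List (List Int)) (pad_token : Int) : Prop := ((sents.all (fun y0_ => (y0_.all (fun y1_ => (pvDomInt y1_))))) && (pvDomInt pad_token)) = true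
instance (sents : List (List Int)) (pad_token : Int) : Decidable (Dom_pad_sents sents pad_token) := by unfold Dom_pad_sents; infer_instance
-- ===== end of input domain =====

-- B pads column-wise (position by position across all sentences) instead of A's per-sentence
-- pre-filled pad buffer overwritten by slice assignment; same cost, different traversal.

-- ===== PORT A =====
-- max(len(s) for s in sents): Python's max of a nonempty sequence (first element, then fold max);
-- the [] branch is unreachable under Pre_pad_sents (Python raises ValueError there).
def pyMaxLen (sents : List (List Int)) : Nat :=
  match sents.map List.length with
  | [] => 0
  | x :: xs => xs.foldl Nat.max x

def pad_sents (sents : List (List Int)) (pad_token : Int) : List (List Int) :=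
  let max_len := pyMaxLen sents
  -- for s in sents: padded = [pad_token]*max_len; padded[:len(s)] = s; append
  -- (slice assignment replaces the first len(s) slots, len(s) ≤ max_len: s ++ rest of the buffer)
  sents.foldl (fun sents_padded s =>
    sents_padded ++ [s ++ (List.replicate max_len pad_token).drop s.length]) []

-- ===== PORT B =====
def pad_sents_alt (sents : List (List Int)) (pad_token : Int) : List (List Int) :=
  let max_len := pyMaxLen sents
  -- for j in range(max_len): for row, s in zip(out, sents): row.append(s[j] if j < len(s) else pad_token)
  (List.range max_len).foldl
    (fun out j =>
      (out.zip sents).map (fun p =>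
        p.1 ++ [if j < p.2.length then p.2.getD j pad_token else pad_token]))
    (sents.map (fun _ => []))

-- ===== PRECONDITION & SPEC =====
-- Pre_ excludes only sents = [], where Python A (and B) raise ValueError from max() of an empty sequence.
def Pre_pad_sents (sents : List (List Int)) (pad_token : Int) : Prop := sents ≠ []
instance (sents : List (List Int)) (pad_token : Int) : Decidable (Pre_pad_sents sents pad_token) := by unfold Pre_pad_sents; infer_instance
def pvWitness_pad_sents : List (List Int) × Int := ([[1, 2], [3]], 0)

def Spec_pad_sents (sents : List (List Int)) (pad_token : Int) (out : List (List Int)) : Prop := out = pad_sents_alt sents pad_token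
instance (sents : List (List Int)) (pad_token : Int) (out : List (List Int)) : Decidable (Spec_pad_sents sents pad_token out) := by unfold Spec_pad_sents; infer_instance

-- ===== CLAIM (what is proved, stated in full; the proofs are below) =====
def Claim_equal_pad_sents : Prop := ∀ (sents : List (List Int)) (pad_token : Int), Dom_pad_sents sents pad_token → Pre_pad_sents sents pad_token → Spec_pad_sents sents pad_token (pad_sents sents pad_token)

-- ===== LEMMAS AND PROOFS =====

-- every length is bounded by pyMaxLen
theorem foldl_max_bounds (xs : List Nat) (b : Nat) :
    b ≤ xs.foldl Nat.max b ∧ ∀ a ∈ xs, a ≤ xs.foldl Nat.max b := by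
  induction xs generalizing b with
  | nil => simp
  | cons x xs ih =>
    refine ⟨?_, ?_⟩
    · exact le_trans (Nat.le_max_left b x) (ih (Nat.max b x)).1
    · intro a ha
      rcases List.mem_cons.mp ha with h | h
      · subst h; exact le_trans (Nat.le_max_right b a) (ih (Nat.max b a)).1
      · exact (ih (Nat.max b x)).2 a h

theorem length_le_pyMaxLen {sents : List (List Int)} {s : List Int} (h : s ∈ sents) :
    s.length ≤ pyMaxLen sents := by
  unfold pyMaxLen
  cases sents with
  | nil => cases h
  | cons t ts =>
    simp only [List.map_cons]
    rcases List.mem_cons.mp h with rfl | h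
    · exact (foldl_max_bounds (ts.map List.length) s.length).1
    · exact (foldl_max_bounds (ts.map List.length) t.length).2 _
        (List.mem_map.mpr ⟨s, h, rfl⟩)

-- A's accumulator loop is map
theorem foldl_append_map (l : List (List Int)) (h : List Int → List Int) (init : List (List Int)) :
    l.foldl (fun acc x => acc ++ [h x]) init = init ++ l.map h := by
  induction l generalizing init with
  | nil => simp
  | cons x xs ih => simp [ih]

theorem zip_map_self {α β : Type} (l : List α) (f : α → β) :
    (l.map f).zip l = l.map (fun x => (f x, x)) := by
  induction l with
  | nil => rfl
  | cons x xs ih => simp [ih]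

-- the column built at position j, for all positions 0..n-1
theorem range_map_cols (n : Nat) (s : List Int) (pad : Int) :
    (List.range n).map (fun j => if j < s.length then s.getD j pad else pad)
      = s.take n ++ List.replicate (n - s.length) pad := by
  induction n with
  | zero => simp
  | succ n ih =>
    rw [List.range_succ, List.map_append, ih]
    by_cases h : n < s.length
    · have h1 : n + 1 - s.length = 0 := by omega
      have h2 : n - s.length = 0 := by omega
      have hg : s.getD n pad = s[n] := by simp [List.getD, List.getElem?_eq_getElem h]
      rw [h1, h2, List.take_add_one, List.getElem?_eq_getElem h]
      simp [h]
    · have h1 : s.length ≤ n := by omega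
      have h2 : n + 1 - s.length = (n - s.length) + 1 := by omega
      rw [h2, List.replicate_succ', List.take_of_length_le h1,
        List.take_of_length_le (Nat.le_succ_of_le h1), List.map_cons, List.map_nil, if_neg h]
      simp

-- B's loop invariant: after the first n columns each row holds its first n padded entries
theorem alt_loop_inv (sents : List (List Int)) (pad : Int) (n : Nat) :
    (List.range n).foldl
      (fun out j => (out.zip sents).map (fun p =>
        p.1 ++ [if j < p.2.length then p.2.getD j pad else pad]))
      (sents.map (fun _ => []))
    = sents.map (fun s => (List.range n).map (fun j => if j < s.length then s.getD j pad else pad)) := by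
  induction n with
  | zero => simp
  | succ n ih =>
    rw [List.range_succ, List.foldl_append, ih, List.foldl_cons, List.foldl_nil,
      zip_map_self, List.map_map]
    apply List.map_congr_left
    intro s _
    simp

-- ===== VERDICT (by name: the statement is the Claim_ definition above) =====
theorem pad_sents_spec : Claim_equal_pad_sents := by
  intro sents pad _ _
  unfold Spec_pad_sents pad_sents pad_sents_alt
  rw [foldl_append_map, List.nil_append, alt_loop_inv, List.map_congr_left]
  intro s hs
  rw [range_map_cols, List.drop_replicate,
    List.take_of_length_le (length_le_pyMaxLen hs)]
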